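-- pv_equiv track=rewrite | github.com/raghav198/coyote | vector_synth/evafy.py | get_bitlist
-- ===== SOURCE A (Python) =====
-- def get_bitlist(bitstring):
--     bits = []
--     power = 1
--     for char in bitstring[::-1]:
--         if char == '1':
--             bits.append(f'bit{power}')
--         power *= 2
--     return bits
-- ===== SOURCE B (Python) =====
-- def get_bitlist(bitstring):
--     n = len(bitstring)
--     return [f'bit{2 ** (n - 1 - i)}' for i, c in enumerate(bitstring) if c == '1'][::-1]
-- ===== Notes on version B (the rewrite author's own statement) =====
-- stated objective: faster
-- what changed: B scans forward with enumerate and computes each label's power in closed form from the index, reversing the result once at the end, instead of A's reversed scan that keeps a running doubled-big-integer power accumulator updated on every character.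
import Mathlib
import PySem

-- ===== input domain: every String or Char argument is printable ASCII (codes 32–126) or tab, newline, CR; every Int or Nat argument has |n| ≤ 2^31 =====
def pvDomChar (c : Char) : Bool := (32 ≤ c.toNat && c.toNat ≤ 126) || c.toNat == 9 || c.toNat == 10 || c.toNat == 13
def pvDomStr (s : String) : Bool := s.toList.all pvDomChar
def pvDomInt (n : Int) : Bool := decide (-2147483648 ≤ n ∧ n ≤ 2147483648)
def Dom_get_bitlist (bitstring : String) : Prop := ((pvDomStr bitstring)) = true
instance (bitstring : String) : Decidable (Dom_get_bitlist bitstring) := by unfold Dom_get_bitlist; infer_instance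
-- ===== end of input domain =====

-- B replaces A's reversed scan with a running power accumulator by a forward enumerate
-- with a closed-form power 2^(n-1-i) and a single final reverse (alternative decomposition).


-- ===== PORT A =====
-- bitstring[::-1] is PySem.List.slice? … (-1); it is always `some` (step ≠ 0), `.getD []` totalises.
def get_bitlist (bitstring : String) : List String :=
  ((PySem.List.slice? bitstring.toList none none (-1)).getD []
    |>.foldl (fun (st : List String × Int) char =>
        ((if char = '1' then st.1 ++ ["bit" ++ PySem.Int.toStr st.2] else st.1), st.2 * 2))
      ([], 1)).1

-- ===== PORT B =====
-- [ … ][::-1] on the comprehension is List.reverse; 2 ** (n-1-i) with n-1-i ≥ 0 inside the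
-- loop is (2:Int) ^ (n-1-i).toNat (exact there).
def get_bitlist_alt (bitstring : String) : List String :=
  let n : Int := PySem.Str.len bitstring
  ((PySem.List.enumerate bitstring.toList 0).filterMap
      (fun p => if p.2 = '1'
        then some ("bit" ++ PySem.Int.toStr ((2:Int) ^ (n - 1 - p.1).toNat))
        else none)).reverse

-- ===== PRECONDITION & SPEC =====
def Spec_get_bitlist (bitstring : String) (out : List String) : Prop := out = get_bitlist_alt bitstring
instance (bitstring : String) (out : List String) : Decidable (Spec_get_bitlist bitstring out) := by unfold Spec_get_bitlist; infer_instance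

-- ===== CLAIM (what is proved, stated in full; the proofs are below) =====
def Claim_equal_get_bitlist : Prop := ∀ (bitstring : String), Dom_get_bitlist bitstring → Spec_get_bitlist bitstring (get_bitlist bitstring)

-- ===== LEMMAS AND PROOFS =====

-- A's loop as a structural function: labels emitted left-to-right with doubling power.
def pvF : List Char → Int → List String
  | [], _ => []
  | c :: t, p => (if c = '1' then ["bit" ++ PySem.Int.toStr p] else []) ++ pvF t (p * 2)

-- B's comprehension as a structural function: index-driven closed-form power.
def pvH (m : Int) : List Char → Int → List String
  | [], _ => []
  | c :: t, s => (if c = '1' then ["bit" ++ PySem.Int.toStr ((2:Int) ^ (m - s).toNat)] else [])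
      ++ pvH m t (s + 1)

theorem pvFoldA (l : List Char) (bits : List String) (p : Int) :
    (l.foldl (fun (st : List String × Int) char =>
        ((if char = '1' then st.1 ++ ["bit" ++ PySem.Int.toStr st.2] else st.1), st.2 * 2))
      (bits, p)).1 = bits ++ pvF l p := by
  induction l generalizing bits p with
  | nil => simp [pvF]
  | cons c t ih => by_cases h : c = '1' <;> simp [pvF, h, ih]

theorem pvFApp (l : List Char) (c : Char) (p : Int) :
    pvF (l ++ [c]) p
      = pvF l p ++ (if c = '1' then ["bit" ++ PySem.Int.toStr (p * 2 ^ l.length)] else []) := by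
  induction l generalizing p with
  | nil => simp [pvF]
  | cons d t ih =>
    simp only [List.cons_append, pvF, ih, List.length_cons]
    have : p * 2 * 2 ^ t.length = p * 2 ^ (t.length + 1) := by ring
    rw [this, List.append_assoc]

theorem pvHEnum (l : List Char) (m s : Int) :
    (PySem.List.enumerate l s).filterMap
        (fun p => if p.2 = '1'
          then some ("bit" ++ PySem.Int.toStr ((2:Int) ^ (m - p.1).toNat))
          else none) = pvH m l s := by
  induction l generalizing s with
  | nil => simp [PySem.List.enumerate_nil, pvH]
  | cons c t ih =>
    rw [PySem.List.enumerate_cons, List.filterMap_cons]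
    by_cases h : c = '1' <;> simp [pvH, h, ih]

theorem pvHShift (l : List Char) (m s : Int) : pvH m l (s + 1) = pvH (m - 1) l s := by
  induction l generalizing s with
  | nil => rfl
  | cons c t ih =>
    simp only [pvH]
    have h1 : m - (s + 1) = m - 1 - s := by ring
    rw [h1, ih]

theorem pvMain (l : List Char) :
    pvF l.reverse 1 = (pvH ((l.length : Int) - 1) l 0).reverse := by
  induction l with
  | nil => rfl
  | cons c t ih =>
    have hm : ((c :: t).length : Int) - 1 = (t.length : Int) := by
      simp
    rw [List.reverse_cons, pvFApp, ih]
    simp only [pvH, hm]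
    rw [show (0:Int) + 1 = 0 + 1 from rfl, pvHShift]
    have he : ((t.length : Int) - 0).toNat = t.length := by omega
    have hp : (1 : Int) * 2 ^ t.reverse.length = (2:Int) ^ t.length := by
      simp
    rw [List.reverse_append, hp, he]
    by_cases h : c = '1' <;> simp [h]

-- ===== VERDICT (by name: the statement is the Claim_ definition above) =====
theorem get_bitlist_spec : Claim_equal_get_bitlist := by
  intro s _
  show get_bitlist s = get_bitlist_alt s
  unfold get_bitlist get_bitlist_alt
  rw [PySem.List.slice?_none_none_neg_one]
  simp only [Option.getD_some, PySem.Str.len_eq]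
  rw [pvFoldA, pvHEnum]
  simpa using pvMain s.toList
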